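-- pv_equiv track=rewrite | github.com/rclark213/aoc2023 | day13/solution.py | find_mirror_index
-- ===== SOURCE A (Python) =====
-- def find_mirror_index(grid):
--     for i in range(1, len(grid)):
--         top_half = grid[:i][::-1]
--         bottom_half = grid[i:]
--
--         total_mismatches = 0
--         for top_row, bottom_row in zip(top_half, bottom_half):
--             for (top_char, bottom_char) in zip(top_row, bottom_row):
--                 if top_char != bottom_char:
--                     total_mismatches += 1
--         if total_mismatches == 1:
--             return i
--
--     return 0
-- ===== SOURCE B (Python) =====
-- def find_mirror_index(grid):
--     n = len(grid)
--     # A mirror between rows i-1 and i pairs exactly the rows (a, b) with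
--     # a < b and a + b == 2*i - 1 (an odd sum), and such a pair belongs to
--     # the split i == (a + b + 1) // 2.  So make one pass over the
--     # opposite-parity row pairs, accumulating each pair's character-mismatch
--     # count into the bucket of its split, then scan the buckets in order for
--     # the first total of exactly 1.
--     totals = [0] * (n + 1)
--     ne = str.__ne__
--     for a in range(n):
--         ga = grid[a]
--         # rows a+1, a+3, ... pair with row a at splits a+1, a+2, ...
--         for i, gb in enumerate(grid[a + 1::2], a + 1):
--             if ga != gb:
--                 totals[i] += sum(map(ne, ga, gb))
--     for i in range(1, n):
--         if totals[i] == 1: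
--             return i
--     return 0
-- ===== Notes on version B (the rewrite author's own statement) =====
-- stated objective: alternative
-- what changed: B drops A's per-split reversed-prefix/suffix rescan: one pass over the opposite-parity row pairs accumulates each pair's mismatch count (skipping equal rows) into a bucket array indexed by the pair's split (a+b+1)//2, then a second pass scans the buckets for the first total of exactly 1; it trades A's early return for a single full pair pass.
import Mathlib
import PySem

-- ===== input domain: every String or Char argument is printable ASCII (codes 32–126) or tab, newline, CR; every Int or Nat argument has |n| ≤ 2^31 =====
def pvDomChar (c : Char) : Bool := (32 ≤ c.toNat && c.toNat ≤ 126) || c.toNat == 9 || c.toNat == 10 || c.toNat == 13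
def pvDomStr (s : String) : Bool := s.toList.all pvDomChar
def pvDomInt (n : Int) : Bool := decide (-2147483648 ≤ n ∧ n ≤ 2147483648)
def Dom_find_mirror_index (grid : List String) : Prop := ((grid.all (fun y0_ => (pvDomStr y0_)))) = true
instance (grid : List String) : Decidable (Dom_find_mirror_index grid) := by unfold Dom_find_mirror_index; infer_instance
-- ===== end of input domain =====

-- B replaces A's per-split rescan of the reversed prefix against the suffix by a single pass
-- over the opposite-parity row pairs, accumulating each pair's mismatch count into a bucket
-- array indexed by the pair's split, followed by a scan of the buckets (objective: alternative).

-- ===== PORT A =====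
-- loop 'for i in range(1, len(grid))'; grid[:i] = take i and [::-1] = reverse (exact: 0 ≤ i ≤ len)
def pvALoop (grid : List String) (i : Nat) : Int :=
  if _h : i < grid.length then
    let top := (grid.take i).reverse
    let bot := grid.drop i
    let total := (top.zip bot).foldl
      (fun acc p => (p.1.toList.zip p.2.toList).foldl
        (fun a q => if q.1 ≠ q.2 then a + 1 else a) acc) (0 : Int)
    if total = 1 then (i : Int) else pvALoop grid (i + 1)
  else 0
termination_by grid.length - i

def find_mirror_index (grid : List String) : Int := pvALoop grid 1

-- ===== PORT B =====
-- sum(x != y for x, y in zip(a, b))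
def pvRowDiff (a b : String) : Int :=
  (a.toList.zip b.toList).foldl (fun acc q => acc + (if q.1 ≠ q.2 then 1 else 0)) 0

-- the step-2 slice grid[a+1::2] applied after drop (a+1): every other element
-- (hand-written port of a step-2 slice, exact: keeps indices 0, 2, 4, ... of its argument)
def pvStep2 : List String → List String
  | [] => []
  | [x] => [x]
  | x :: _ :: rest => x :: pvStep2 rest

-- inner loop 'for i, gb in enumerate(grid[a+1::2], a+1): if ga != gb: totals[i] += ...'
-- (the carried pair is (totals, i); the bucket index i is always < n+1, so
--  List.set/getD are exact for Python's totals[i] += d)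
def pvInner (grid : List String) (a : Nat) (t : List Int) : List Int :=
  ((pvStep2 (grid.drop (a + 1))).foldl (fun p gb =>
    if (grid.getD a "") ≠ gb then
      (p.1.set p.2 (p.1.getD p.2 0 + pvRowDiff (grid.getD a "") gb), p.2 + 1)
    else (p.1, p.2 + 1)) (t, a + 1)).1

-- 'totals = [0]*(n+1)' then outer loop 'for a in range(n)'
def pvTotals (grid : List String) (n : Nat) : List Int :=
  (List.range n).foldl (fun t a => pvInner grid a t) (List.replicate (n + 1) 0)

-- second loop: 'for i in range(1, n): if totals[i] == 1: return i' then 'return 0'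
def pvBScan (totals : List Int) (n i : Nat) : Int :=
  if _h : i < n then
    if totals.getD i 0 = 1 then (i : Int) else pvBScan totals n (i + 1)
  else 0
termination_by n - i

def find_mirror_index_alt (grid : List String) : Int :=
  pvBScan (pvTotals grid grid.length) grid.length 1

-- ===== PRECONDITION & SPEC =====
def Spec_find_mirror_index (grid : List String) (out : Int) : Prop := out = find_mirror_index_alt grid
instance (grid : List String) (out : Int) : Decidable (Spec_find_mirror_index grid out) := by unfold Spec_find_mirror_index; infer_instance

-- ===== CLAIM (what is proved, stated in full; the proofs are below) =====
def Claim_equal_find_mirror_index : Prop := ∀ (grid : List String), Dom_find_mirror_index grid → Spec_find_mirror_index grid (find_mirror_index grid)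

-- ===== LEMMAS AND PROOFS =====

-- the 0/1 mismatch weight of a char pair
def pvW (q : Char × Char) : Int := if q.1 ≠ q.2 then 1 else 0

lemma foldl_ite_count (l : List (Char × Char)) (acc : Int) :
    l.foldl (fun a q => if q.1 ≠ q.2 then a + 1 else a) acc = acc + (l.map pvW).sum := by
  induction l generalizing acc with
  | nil => simp
  | cons q l ih =>
    simp only [List.foldl_cons, List.map_cons, List.sum_cons, ih, pvW]
    split_ifs <;> ring

lemma foldl_add_count (l : List (Char × Char)) (acc : Int) :
    l.foldl (fun a q => a + (if q.1 ≠ q.2 then 1 else 0)) acc = acc + (l.map pvW).sum := by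
  induction l generalizing acc with
  | nil => simp
  | cons q l ih =>
    simp only [List.foldl_cons, List.map_cons, List.sum_cons, ih, pvW]
    ring

lemma rowDiff_eq (a b : String) :
    pvRowDiff a b = ((a.toList.zip b.toList).map pvW).sum := by
  unfold pvRowDiff
  simpa using foldl_add_count (a.toList.zip b.toList) 0

-- distance of row pair k around split i
def pvD (grid : List String) (i k : Nat) : Int :=
  pvRowDiff (grid.getD (i - 1 - k) "") (grid.getD (i + k) "")

lemma outer_foldl_eq (L : List (String × String)) (acc : Int) :
    L.foldl (fun acc p => (p.1.toList.zip p.2.toList).foldl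
        (fun a q => if q.1 ≠ q.2 then a + 1 else a) acc) acc
      = acc + (L.map (fun p => pvRowDiff p.1 p.2)).sum := by
  induction L generalizing acc with
  | nil => simp
  | cons p L ih =>
    simp only [List.foldl_cons, List.map_cons, List.sum_cons]
    rw [ih, foldl_ite_count, rowDiff_eq]
    ring

lemma zip_halves_eq (grid : List String) (i : Nat) (hi : i ≤ grid.length) :
    ((grid.take i).reverse).zip (grid.drop i)
      = (List.range (min i (grid.length - i))).map
          (fun k => (grid.getD (i - 1 - k) "", grid.getD (i + k) "")) := by
  apply List.ext_getElem
  · simp only [List.length_zip, List.length_reverse, List.length_take, List.length_drop,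
      List.length_map, List.length_range]
    omega
  · intro k h1 h2
    have hk : k < min i (grid.length - i) := by
      simp only [List.length_zip, List.length_reverse, List.length_take, List.length_drop] at h1
      omega
    have hk1 : i - 1 - k < grid.length := by omega
    have hk2 : i + k < grid.length := by omega
    have hlen : (List.take i grid).length = i := by simp; omega
    simp only [List.getElem_zip, List.getElem_reverse, List.getElem_map, List.getElem_range,
      List.getElem_take, List.getElem_drop, hlen]
    rw [List.getD_eq_getElem _ _ hk1, List.getD_eq_getElem _ _ hk2]

-- A's total for split i is the diagonal sum of pvD
def pvDiag (grid : List String) (i : Nat) : Int :=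
  ((List.range (min i (grid.length - i))).map (pvD grid i)).sum

lemma totalA_eq (grid : List String) (i : Nat) (hi : i ≤ grid.length) :
    (((grid.take i).reverse).zip (grid.drop i)).foldl
      (fun acc p => (p.1.toList.zip p.2.toList).foldl
        (fun a q => if q.1 ≠ q.2 then a + 1 else a) acc) (0 : Int)
    = pvDiag grid i := by
  rw [outer_foldl_eq, zip_halves_eq grid i hi]
  unfold pvDiag pvD
  simp [List.map_map, Function.comp_def]

-- ---- B side: bucket contents ----

-- contribution of outer row a to bucket i (the inner enumerate loop visits rows a+1+2j
-- at bucket index a+1+j)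
def pvContrib (grid : List String) (n i a : Nat) : Int :=
  ∑ j ∈ Finset.range ((n - (a + 1) + 1) / 2),
    if a + 1 + j = i then
      pvRowDiff (grid.getD a "") (grid.getD (a + 1 + 2 * j) "") else 0

lemma getD_set_bump (t : List Int) (j i : Nat) (v : Int) (hj : j < t.length) :
    (t.set j (t.getD j 0 + v)).getD i 0 = t.getD i 0 + if j = i then v else 0 := by
  by_cases h : j = i
  · subst h
    simp [List.getD, hj]
  · simp [List.getD, List.getElem?_set_ne h, h]

lemma rowDiff_self (a : String) : pvRowDiff a a = 0 := by
  rw [rowDiff_eq]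
  have hz : ∀ l : List Char, l.zip l = l.map (fun x => (x, x)) := by
    intro l; induction l with
    | nil => rfl
    | cons x l ih => simp [List.zip_cons_cons, ih]
  rw [hz, List.map_map]
  have : ∀ x ∈ a.toList.map ((fun q : Char × Char => pvW q) ∘ fun x => (x, x)), x = 0 := by
    intro x hx
    obtain ⟨c, _, rfl⟩ := List.mem_map.mp hx
    simp [pvW]
  rw [List.sum_eq_zero this]

lemma pvStep2_length (l : List String) : (pvStep2 l).length = (l.length + 1) / 2 := by
  induction l using pvStep2.induct with
  | case1 => rfl
  | case2 x => simp [pvStep2]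
  | case3 x y rest ih => simp only [pvStep2, List.length_cons, ih]; omega

lemma pvStep2_getD (l : List String) (j : Nat) :
    (pvStep2 l).getD j "" = if j < (l.length + 1) / 2 then l.getD (2 * j) "" else "" := by
  induction l using pvStep2.induct generalizing j with
  | case1 => simp [pvStep2]
  | case2 x =>
    match j with
    | 0 => simp [pvStep2]
    | j + 1 => simp [pvStep2, List.getD]
  | case3 x y rest ih =>
    match j with
    | 0 => simp [pvStep2]
    | j + 1 =>
      simp only [pvStep2, List.getD_cons_succ, ih j, List.length_cons]
      have h2 : 2 * (j + 1) = 2 * j + 1 + 1 := by omega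
      rw [h2, List.getD_cons_succ, List.getD_cons_succ]
      by_cases hj : j < (rest.length + 1) / 2
      · rw [if_pos hj, if_pos (by omega)]
      · rw [if_neg hj, if_neg (by omega)]

-- the enumerate fold: starting bucket s, buckets s+j for position j
lemma enum_fold_getD (ga : String) (i : Nat) (l : List String) : ∀ (t : List Int) (s : Nat),
    s + l.length ≤ t.length →
    ((l.foldl (fun p gb =>
        if ga ≠ gb then
          (p.1.set p.2 (p.1.getD p.2 0 + pvRowDiff ga gb), p.2 + 1)
        else (p.1, p.2 + 1)) (t, s)).1).getD i 0
      = t.getD i 0 + ∑ j ∈ Finset.range l.length,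
          (if s + j = i then pvRowDiff ga (l.getD j "") else 0) := by
  induction l with
  | nil => intro t s _; simp
  | cons gb l ih =>
    intro t s hs
    simp only [List.foldl_cons, List.length_cons]
    rw [Finset.sum_range_succ']
    by_cases hne : ga ≠ gb
    · rw [if_pos hne]
      have hset : (t.set s (t.getD s 0 + pvRowDiff ga gb)).length = t.length := by
        rw [List.length_set]
      rw [ih _ (s + 1) (by rw [hset]; simp at hs ⊢; omega),
        getD_set_bump t s i _ (by simp at hs; omega)]
      simp only [List.getD_cons_succ, List.getD_cons_zero]
      have hre : ∀ j, s + 1 + j = s + (j + 1) := by intro j; omega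
      rw [Finset.sum_congr rfl (fun j _ => by rw [hre j])]
      ring
    · rw [if_neg hne]
      rw [not_not] at hne
      subst hne
      rw [ih _ (s + 1) (by simp at hs ⊢; omega)]
      simp only [List.getD_cons_succ, List.getD_cons_zero, rowDiff_self, ite_self]
      have hre : ∀ j, s + 1 + j = s + (j + 1) := by intro j; omega
      rw [Finset.sum_congr rfl (fun j _ => by rw [hre j])]
      simp

lemma inner_length (grid : List String) (a : Nat) (t : List Int) :
    (pvInner grid a t).length = t.length := by
  unfold pvInner
  generalize pvStep2 (grid.drop (a + 1)) = l
  suffices h : ∀ (t : List Int) (s : Nat),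
      ((l.foldl (fun p gb =>
        if (grid.getD a "") ≠ gb then
          (p.1.set p.2 (p.1.getD p.2 0 + pvRowDiff (grid.getD a "") gb), p.2 + 1)
        else (p.1, p.2 + 1)) (t, s)).1).length = t.length from h t (a + 1)
  induction l with
  | nil => intro t s; rfl
  | cons gb l ih =>
    intro t s
    simp only [List.foldl_cons]
    split_ifs
    · rw [ih]; simp
    · exact ih t (s + 1)

lemma inner_getD (grid : List String) (n a i : Nat) (t : List Int) (ht : t.length = n + 1)
    (ha : a < n) (hn : grid.length = n) :
    (pvInner grid a t).getD i 0 = t.getD i 0 + pvContrib grid n i a := by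
  unfold pvInner pvContrib
  have hlen : (pvStep2 (grid.drop (a + 1))).length = (n - (a + 1) + 1) / 2 := by
    rw [pvStep2_length, List.length_drop, hn]
  have hfold := enum_fold_getD (grid.getD a "") i (pvStep2 (grid.drop (a + 1))) t (a + 1)
    (by rw [ht, hlen]; omega)
  rw [hfold, hlen]
  congr 1
  refine Finset.sum_congr rfl fun j hj => ?_
  rw [Finset.mem_range] at hj
  have hstep : (pvStep2 (grid.drop (a + 1))).getD j "" = grid.getD (a + 1 + 2 * j) "" := by
    rw [pvStep2_getD, List.length_drop, hn, if_pos (by omega : j < (n - (a + 1) + 1) / 2)]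
    simp [List.getD, List.getElem?_drop]
  rw [hstep]

lemma totals_fold_getD (grid : List String) (n i : Nat) (hn : grid.length = n) :
    ∀ (l : List Nat), (∀ a ∈ l, a < n) → ∀ (t : List Int), t.length = n + 1 →
      (l.foldl (fun t a => pvInner grid a t) t).getD i 0
        = t.getD i 0 + (l.map (pvContrib grid n i)).sum := by
  intro l
  induction l with
  | nil => intro _ t _; simp
  | cons a l ih =>
    intro hmem t ht
    have hmem' : ∀ a' ∈ l, a' < n := fun a' h => hmem a' (List.mem_cons_of_mem _ h)
    simp only [List.foldl_cons, List.map_cons, List.sum_cons]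
    rw [ih hmem' _ (by rw [inner_length]; exact ht),
      inner_getD grid n a i t ht (hmem a List.mem_cons_self) hn]
    ring

lemma totals_getD (grid : List String) (n i : Nat) (hn : grid.length = n) :
    (pvTotals grid n).getD i 0 = ((List.range n).map (pvContrib grid n i)).sum := by
  unfold pvTotals
  rw [totals_fold_getD grid n i hn (List.range n) (fun a ha => List.mem_range.mp ha)
    (List.replicate (n + 1) 0) (by simp)]
  simp [List.getD]

-- ---- the reindexing: bucket i equals A's diagonal sum for split i ----

lemma sum_map_range (f : Nat → Int) (n : Nat) :
    ((List.range n).map f).sum = ∑ a ∈ Finset.range n, f a := by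
  induction n with
  | zero => simp
  | succ n ih => rw [List.range_succ, Finset.sum_range_succ]; simp [ih]

lemma contrib_closed (grid : List String) (n i a : Nat) :
    pvContrib grid n i a
      = if a + 1 ≤ i ∧ i - (a + 1) < (n - (a + 1) + 1) / 2 then
          pvRowDiff (grid.getD a "") (grid.getD (2 * i - 1 - a) "") else 0 := by
  unfold pvContrib
  have hiff : ∀ j : Nat, (a + 1 + j = i) ↔ (j = i - (a + 1) ∧ a + 1 ≤ i) := by
    intro j; omega
  calc (∑ j ∈ Finset.range ((n - (a + 1) + 1) / 2),
          if a + 1 + j = i then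
            pvRowDiff (grid.getD a "") (grid.getD (a + 1 + 2 * j) "") else 0)
      = ∑ j ∈ Finset.range ((n - (a + 1) + 1) / 2),
          if j = i - (a + 1) ∧ a + 1 ≤ i then
            pvRowDiff (grid.getD a "") (grid.getD (a + 1 + 2 * j) "") else 0 := by
        refine Finset.sum_congr rfl fun j _ => ?_
        exact if_congr (hiff j) rfl rfl
    _ = _ := by
        by_cases hai : a + 1 ≤ i
        · simp only [hai, and_true]
          rw [Finset.sum_ite_eq' (Finset.range ((n - (a + 1) + 1) / 2)) (i - (a + 1))
            (fun j => pvRowDiff (grid.getD a "") (grid.getD (a + 1 + 2 * j) ""))]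
          have harg : a + 1 + 2 * (i - (a + 1)) = 2 * i - 1 - a := by omega
          simp [harg]
        · simp [hai]

lemma bucket_eq_diag (grid : List String) (i : Nat) :
    ((List.range grid.length).map (pvContrib grid grid.length i)).sum = pvDiag grid i := by
  unfold pvDiag
  rw [sum_map_range, sum_map_range]
  calc ∑ a ∈ Finset.range grid.length, pvContrib grid grid.length i a
      = ∑ a ∈ Finset.range grid.length,
          if a + 1 ≤ i ∧ i - (a + 1) < (grid.length - (a + 1) + 1) / 2 then
            pvRowDiff (grid.getD a "") (grid.getD (2 * i - 1 - a) "") else 0 :=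
        Finset.sum_congr rfl fun a _ => contrib_closed grid grid.length i a
    _ = ∑ a ∈ (Finset.range grid.length).filter
          (fun a => a + 1 ≤ i ∧ i - (a + 1) < (grid.length - (a + 1) + 1) / 2),
          pvRowDiff (grid.getD a "") (grid.getD (2 * i - 1 - a) "") :=
        (Finset.sum_filter _ _).symm
    _ = ∑ k ∈ Finset.range (min i (grid.length - i)), pvD grid i k := by
        refine Finset.sum_nbij' (fun a => i - 1 - a) (fun k => i - 1 - k) ?_ ?_ ?_ ?_ ?_
        · intro a ha
          simp only [Finset.mem_filter, Finset.mem_range] at ha ⊢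
          omega
        · intro k hk
          simp only [Finset.mem_filter, Finset.mem_range] at hk ⊢
          omega
        · intro a ha
          simp only [Finset.mem_filter, Finset.mem_range] at ha
          show i - 1 - (i - 1 - a) = a
          omega
        · intro k hk
          simp only [Finset.mem_range] at hk
          show i - 1 - (i - 1 - k) = k
          omega
        · intro a ha
          simp only [Finset.mem_filter, Finset.mem_range] at ha
          unfold pvD
          have h1 : i - 1 - (i - 1 - a) = a := by omega
          have h2 : i + (i - 1 - a) = 2 * i - 1 - a := by omega
          rw [h1, h2]

-- ---- scan loops agree ----

lemma loop_eq (grid : List String) : ∀ (j i : Nat), grid.length - i = j → 1 ≤ i →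
    pvALoop grid i = pvBScan (pvTotals grid grid.length) grid.length i := by
  intro j
  induction j with
  | zero =>
    intro i hj _
    have h : ¬ i < grid.length := by omega
    rw [pvALoop, pvBScan, dif_neg h, dif_neg h]
  | succ j ih =>
    intro i hj hi1
    have h : i < grid.length := by omega
    rw [pvALoop, pvBScan, dif_pos h, dif_pos h]
    show (if (((grid.take i).reverse.zip (grid.drop i)).foldl
        (fun acc p => (p.1.toList.zip p.2.toList).foldl
          (fun a q => if q.1 ≠ q.2 then a + 1 else a) acc) (0 : Int)) = 1
        then (i : Int) else pvALoop grid (i + 1))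
      = (if (pvTotals grid grid.length).getD i 0 = 1 then (i : Int)
         else pvBScan (pvTotals grid grid.length) grid.length (i + 1))
    rw [totalA_eq grid i (le_of_lt h), totals_getD grid grid.length i rfl, bucket_eq_diag]
    by_cases hs : pvDiag grid i = 1
    · rw [if_pos hs, if_pos hs]
    · rw [if_neg hs, if_neg hs]
      exact ih (i + 1) (by omega) (by omega)

-- ===== VERDICT (by name: the statement is the Claim_ definition above) =====
theorem find_mirror_index_spec : Claim_equal_find_mirror_index := by
  intro grid _
  unfold Spec_find_mirror_index find_mirror_index find_mirror_index_alt
  exact loop_eq grid (grid.length - 1) 1 rfl (le_refl 1)
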